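-- pv_equiv track=rewrite | github.com/kuro-vale/kuro-python | extra/hallway.py | count_greetings
-- ===== SOURCE A (Python) =====
-- def count_greetings(s):
--     greetings = 0
--     for i in range(len(s)):
--         if s[i] == ">":
--             for j in range(i + 1, len(s)):
--                 if s[j] == "<":
--                     greetings += 1
--         if s[i] == "<":
--             for j in range(i):
--                 if s[j] == ">":
--                     greetings += 1
--
--     return greetings
-- ===== SOURCE B (Python) =====
-- def count_greetings(s):
--     greetings = 0
--     gt_so_far = 0
--     for c in s:
--         if c == ">":
--             gt_so_far += 1
--         elif c == "<":
--             greetings += 2 * gt_so_far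
--     return greetings
-- ===== Notes on version B (the rewrite author's own statement) =====
-- stated objective: simpler
-- what changed: Replaced the double-counting nested index scans (for each greater-than sign scan the suffix, for each less-than sign scan the prefix) by a single left-to-right pass keeping a running count of greater-than signs seen so far and adding twice that count per less-than sign.
import Mathlib
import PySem

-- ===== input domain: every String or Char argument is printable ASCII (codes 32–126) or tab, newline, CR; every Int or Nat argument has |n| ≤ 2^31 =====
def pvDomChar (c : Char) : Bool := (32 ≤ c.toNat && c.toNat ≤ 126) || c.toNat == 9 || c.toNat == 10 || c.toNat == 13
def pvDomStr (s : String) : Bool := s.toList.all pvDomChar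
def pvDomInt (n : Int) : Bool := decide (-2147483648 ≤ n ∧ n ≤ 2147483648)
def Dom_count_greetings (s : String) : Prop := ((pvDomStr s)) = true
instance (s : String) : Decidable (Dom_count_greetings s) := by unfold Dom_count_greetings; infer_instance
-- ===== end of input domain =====

-- B replaces A's nested per-index scans with a single pass holding a running count of '>' seen so far; same value on all strings.

-- ===== PORT A =====
def count_greetings (s : String) : Int :=
  let cs := s.toList
  let n : Int := PySem.List.len cs
  (PySem.List.pyRange 0 n).foldl (fun g i =>
    let g :=
      if PySem.List.pyGetD cs i ' ' = '>' then
        (PySem.List.pyRange (i + 1) n).foldl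
          (fun g2 j => if PySem.List.pyGetD cs j ' ' = '<' then g2 + 1 else g2) g
      else g
    if PySem.List.pyGetD cs i ' ' = '<' then
      (PySem.List.pyRange 0 i).foldl
        (fun g2 j => if PySem.List.pyGetD cs j ' ' = '>' then g2 + 1 else g2) g
    else g) 0

-- ===== PORT B =====
def count_greetings_alt (s : String) : Int :=
  -- state = (greetings, gt_so_far), exactly Source B's two accumulators
  (s.toList.foldl (fun (st : Int × Int) c =>
      if c = '>' then (st.1, st.2 + 1)
      else if c = '<' then (st.1 + 2 * st.2, st.2)
      else st) (0, 0)).1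

-- ===== PRECONDITION & SPEC =====
def Spec_count_greetings (s : String) (out : Int) : Prop := out = count_greetings_alt s
instance (s : String) (out : Int) : Decidable (Spec_count_greetings s out) := by unfold Spec_count_greetings; infer_instance

-- ===== CLAIM (what is proved, stated in full; the proofs are below) =====
def Claim_equal_count_greetings : Prop := ∀ (s : String), Dom_count_greetings s → Spec_count_greetings s (count_greetings s)

-- ===== LEMMAS AND PROOFS =====

-- number of '<' (resp. '>') in a list, as an Int
def cntLt (xs : List Char) : Int := (xs.countP (fun c => c == '<') : Int)
def cntGt (xs : List Char) : Int := (xs.countP (fun c => c == '>') : Int)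

-- number of ordered ('>','<') pairs
def pairsGL : List Char → Int
  | [] => 0
  | c :: rest => (if c = '>' then cntLt rest else 0) + pairsGL rest

-- contribution of index k in A's outer loop
def tN (cs : List Char) (k : Nat) : Int :=
  (if cs.getD k ' ' = '>' then cntLt (cs.drop (k + 1)) else 0) +
  (if cs.getD k ' ' = '<' then cntGt (cs.take k) else 0)

lemma cntLt_nil : cntLt [] = 0 := by simp [cntLt]

lemma cntGt_nil : cntGt [] = 0 := by simp [cntGt]

lemma cntLt_cons (c : Char) (xs : List Char) :
    cntLt (c :: xs) = (if c = '<' then 1 else 0) + cntLt xs := by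
  by_cases h : c = '<' <;> simp [cntLt, h] <;> try ring

lemma cntGt_cons (c : Char) (xs : List Char) :
    cntGt (c :: xs) = (if c = '>' then 1 else 0) + cntGt xs := by
  by_cases h : c = '>' <;> simp [cntGt, h] <;> try ring

lemma foldl_cntLt (xs : List Char) (a : Int) :
    xs.foldl (fun g2 c => if c = '<' then g2 + 1 else g2) a = a + cntLt xs := by
  simpa [cntLt] using PySem.List.foldl_count_if (fun c => c == '<') xs a

lemma foldl_cntGt (xs : List Char) (a : Int) :
    xs.foldl (fun g2 c => if c = '>' then g2 + 1 else g2) a = a + cntGt xs := by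
  simpa [cntGt] using PySem.List.foldl_count_if (fun c => c == '>') xs a

lemma map_getD_range {β : Type} (xs : List Char) (d : Char) (f : Char → β) :
    (List.range xs.length).map (fun k => f (xs.getD k d)) = xs.map f := by
  induction xs with
  | nil => simp
  | cons c rest ih =>
    simpa [List.range_succ_eq_map, List.map_map, Function.comp, Nat.succ_eq_add_one,
      List.getD_cons_succ] using ih

lemma sum_lt_range (rest : List Char) :
    ((List.range rest.length).map
      (fun k => if rest.getD k ' ' = '<' then (1 : Int) else 0)).sum = cntLt rest := by
  rw [map_getD_range rest ' ' (fun c => if c = '<' then (1 : Int) else 0)]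
  simpa [cntLt] using PySem.List.sum_map_ite_one_zero (fun c => c == '<') rest

lemma tN_zero (c : Char) (rest : List Char) :
    tN (c :: rest) 0 = (if c = '>' then cntLt rest else 0) := by
  by_cases h : c = '>' <;> by_cases h2 : c = '<' <;> simp [tN, h, h2, cntGt_nil]

lemma tN_succ (c : Char) (rest : List Char) (k : Nat) :
    tN (c :: rest) (k + 1) =
      tN rest k + (if c = '>' ∧ rest.getD k ' ' = '<' then 1 else 0) := by
  simp only [tN, List.getD_cons_succ, List.drop_succ_cons, List.take_succ_cons, cntGt_cons]
  split_ifs <;> try ring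
  all_goals exfalso
  all_goals tauto

lemma sum_tN (cs : List Char) :
    ((List.range cs.length).map (tN cs)).sum = 2 * pairsGL cs := by
  induction cs with
  | nil => simp [pairsGL]
  | cons c rest ih =>
    have hlen : (c :: rest).length = rest.length + 1 := rfl
    rw [hlen, List.range_succ_eq_map, List.map_cons, List.map_map, List.sum_cons]
    have hmap : (List.range rest.length).map (tN (c :: rest) ∘ Nat.succ) =
        (List.range rest.length).map
          (fun k => tN rest k + (if c = '>' ∧ rest.getD k ' ' = '<' then 1 else 0)) := by
      refine List.map_congr_left ?_
      intro k _
      simpa using tN_succ c rest k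
    rw [hmap, PySem.List.sum_map_add_int, ih, tN_zero]
    by_cases h : c = '>'
    · have : (List.range rest.length).map
          (fun k => if c = '>' ∧ rest.getD k ' ' = '<' then (1 : Int) else 0) =
          (List.range rest.length).map
          (fun k => if rest.getD k ' ' = '<' then (1 : Int) else 0) := by
        simp [h]
      rw [this, sum_lt_range]
      simp [pairsGL, h]; ring
    · have : (List.range rest.length).map
          (fun k => if c = '>' ∧ rest.getD k ' ' = '<' then (1 : Int) else 0) =
          (List.range rest.length).map (fun _ => (0 : Int)) := by
        simp [h]
      rw [this]
      simp [pairsGL, h]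

lemma inner_suffix (cs : List Char) (i : Int) (hi : 0 ≤ i) (g : Int) :
    (PySem.List.pyRange (i + 1) (PySem.List.len cs)).foldl
      (fun g2 j => if PySem.List.pyGetD cs j ' ' = '<' then g2 + 1 else g2) g
      = g + cntLt (cs.drop (i.toNat + 1)) := by
  rw [PySem.List.foldl_pyRange_pyGetD cs ' '
      (fun g2 c => if c = '<' then g2 + 1 else g2) g (by omega)]
  rw [foldl_cntLt]
  have h : (i + 1).toNat = i.toNat + 1 := by omega
  rw [h]

lemma inner_prefix (cs : List Char) (i : Int) (hi : 0 ≤ i) (hilen : i ≤ (cs.length : Int))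
    (g : Int) :
    (PySem.List.pyRange 0 i).foldl
      (fun g2 j => if PySem.List.pyGetD cs j ' ' = '>' then g2 + 1 else g2) g
      = g + cntGt (cs.take i.toNat) := by
  have hlen : PySem.List.len (cs.take i.toNat) = i := by
    rw [PySem.List.len_eq]
    simp [List.length_take]
    omega
  rw [show PySem.List.pyRange 0 i = PySem.List.pyRange 0 (PySem.List.len (cs.take i.toNat))
      from by rw [hlen]]
  rw [PySem.List.foldl_congr_mem _ _
      (fun g2 j => if PySem.List.pyGetD (cs.take i.toNat) j ' ' = '>' then g2 + 1 else g2) g ?_]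
  · rw [PySem.List.foldl_pyRange_zero_pyGetD (cs.take i.toNat) ' '
        (fun g2 c => if c = '>' then g2 + 1 else g2) g]
    exact foldl_cntGt _ g
  · intro acc j hj
    rw [hlen] at hj
    have hj' := PySem.List.mem_pyRange_one.mp hj
    have hjl : j.toNat < (cs.take i.toNat).length := by
      simp [List.length_take]; omega
    have hjl2 : j.toNat < cs.length := by omega
    have e1 : PySem.List.pyGetD cs j ' ' = cs[j.toNat] :=
      PySem.List.pyGetD_eq_getElem cs ' ' hj'.1 (by omega)
    have e2 : PySem.List.pyGetD (cs.take i.toNat) j ' ' = cs[j.toNat] := by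
      rw [PySem.List.pyGetD_eq_getElem (cs.take i.toNat) ' ' hj'.1 (by omega)]
      exact List.getElem_take
    simp only [e1, e2]

lemma a_closed (s : String) : count_greetings s = 2 * pairsGL s.toList := by
  simp only [count_greetings]
  set cs := s.toList with hcs
  rw [PySem.List.len_eq]
  rw [PySem.List.foldl_congr_mem _ _ (fun g i => g + tN cs i.toNat) 0 ?_]
  · rw [PySem.List.foldl_add]
    rw [PySem.List.pyRange_zero_nat, List.map_map]
    have hm : ((fun i => tN cs i.toNat) ∘ (fun k : Nat => (k : Int))) = tN cs :=
      funext (fun k => by simp only [Function.comp_apply, Int.toNat_natCast])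
    rw [hm, sum_tN]
    ring
  · intro g i hi
    have hi' := PySem.List.mem_pyRange_one.mp hi
    obtain ⟨k, rfl⟩ : ∃ k : Nat, i = (k : Int) := ⟨i.toNat, by omega⟩
    have hk : ((k : Nat) : Int).toNat = k := Int.toNat_natCast k
    have h1 : (PySem.List.pyRange ((k : Int) + 1) ((cs.length : Int))).foldl
        (fun g2 j => if PySem.List.pyGetD cs j ' ' = '<' then g2 + 1 else g2) g
        = g + cntLt (cs.drop (k + 1)) := by
      rw [← PySem.List.len_eq]
      simpa [hk] using inner_suffix cs (k : Int) (by omega) g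
    have h2 : (PySem.List.pyRange 0 (k : Int)).foldl
        (fun g2 j => if PySem.List.pyGetD cs j ' ' = '>' then g2 + 1 else g2) g
        = g + cntGt (cs.take k) := by
      simpa [hk] using inner_prefix cs (k : Int) (by omega) (le_of_lt (by exact_mod_cast hi'.2)) g
    simp only [PySem.List.pyGetD_natCast, tN, hk]
    by_cases hgt : cs.getD k ' ' = '>'
    · have hlt : ¬ cs.getD k ' ' = '<' := by rw [hgt]; decide
      rw [if_pos hgt, if_pos hgt, if_neg hlt, if_neg hlt, h1]
      ring
    · by_cases hlt : cs.getD k ' ' = '<'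
      · rw [if_neg hgt, if_neg hgt, if_pos hlt, if_pos hlt, h2]
        ring
      · rw [if_neg hgt, if_neg hgt, if_neg hlt, if_neg hlt]
        ring

lemma alt_fold (cs : List Char) : ∀ g a : Int,
    cs.foldl (fun (st : Int × Int) c =>
      if c = '>' then (st.1, st.2 + 1)
      else if c = '<' then (st.1 + 2 * st.2, st.2)
      else st) (a, g)
    = (a + 2 * g * cntLt cs + 2 * pairsGL cs, g + cntGt cs) := by
  induction cs with
  | nil => intro g a; simp [cntLt_nil, cntGt_nil, pairsGL]
  | cons c rest ih =>
    intro g a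
    by_cases h1 : c = '>' <;> by_cases h2 : c = '<' <;>
      simp only [List.foldl_cons, h1, h2, if_true, if_false, reduceIte, ih,
        cntLt_cons, cntGt_cons, pairsGL] <;>
      first
      | (exfalso; rw [h1] at h2; exact absurd h2 (by decide))
      | (refine Prod.ext ?_ ?_ <;> simp [h1, h2] <;> try ring)

lemma b_closed (s : String) : count_greetings_alt s = 2 * pairsGL s.toList := by
  unfold count_greetings_alt
  rw [alt_fold s.toList 0 0]
  ring

-- ===== VERDICT (by name: the statement is the Claim_ definition above) =====
theorem count_greetings_spec : Claim_equal_count_greetings := by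
  intro s _
  unfold Spec_count_greetings
  rw [a_closed, b_closed]
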